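-- pv_equiv track=rewrite | github.com/ekouakou/APP_RADAR_CHECK | radar_check_api_python/pythonProject/myClass/AnalyseurTirage.py | verifier_completion
-- ===== SOURCE A (Python) =====
-- def verifier_completion(suite):
--     """
--     Vérifie de manière exhaustive si une suite arithmétique est complète
--     et identifie tous les nombres manquants possibles.
--     Limite les numéros à 90 maximum (contrainte de loterie).
--     """
--     # Si la suite est vide ou trop courte, elle ne peut pas être analysée
--     if len(suite) < 2:
--         return []
--
--     # Créer un ensemble pour les recherches rapides
--     suite_set = set(suite)
--     suite_triee = sorted(suite)
--
--     # Calculer toutes les raisons possibles entre les éléments consécutifs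
--     raisons_candidates = []
--     for i in range(len(suite_triee) - 1):
--         raison = suite_triee[i + 1] - suite_triee[i]
--         if raison != 0:  # Ignorer les raisons nulles
--             raisons_candidates.append(raison)
--
--     # S'il n'y a pas de raison candidate, impossible de détecter la complétion
--     if not raisons_candidates:
--         return []
--
--     # La raison la plus fréquente est probablement la bonne
--     from collections import Counter
--     compteur_raisons = Counter(raisons_candidates)
--     raison = compteur_raisons.most_common(1)[0][0]
--
--     # Vérifier la cohérence avec cette raison
--     # Une suite est valide si elle peut être représentée par a + n*r pour tous les éléments
--     # où a est le premier terme et r est la raison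
--
--     # Trouver le premier terme théorique de la suite complète
--     premier_terme = suite_triee[0]
--     # Vérifier si on peut reculer encore plus
--     while premier_terme - raison > 0:
--         premier_terme -= raison
--
--     # Générer tous les termes théoriques de la suite complète
--     termes_theoriques = []
--     terme_courant = premier_terme
--     while terme_courant <= 90:  # Limite supérieure à 90
--         termes_theoriques.append(terme_courant)
--         terme_courant += raison
--
--     # Identifier les termes manquants parmi les termes théoriques
--     nombres_manquants = [terme for terme in termes_theoriques
--                          if terme not in suite_set and
--                          terme > 0 and terme <= 90]  # Assurer que les termes sont entre 1 et 90
--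
--     return sorted(nombres_manquants)
-- ===== SOURCE B (Python) =====
-- def verifier_completion(suite):
--     """Same result as A: keep the raison detection (sorted diffs + Counter),
--     then replace back-walk + forward generation by a closed-form congruence
--     sweep over 1..90."""
--     if len(suite) < 2:
--         return []
--
--     suite_set = set(suite)
--     suite_triee = sorted(suite)
--
--     raisons_candidates = []
--     for i in range(len(suite_triee) - 1):
--         raison = suite_triee[i + 1] - suite_triee[i]
--         if raison != 0:
--             raisons_candidates.append(raison)
--
--     if not raisons_candidates:
--         return []
--
--     from collections import Counter
--     raison = Counter(raisons_candidates).most_common(1)[0][0]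
--
--     r0 = suite_triee[0] % raison
--     return sorted(n for n in range(1, 91)
--                   if n % raison == r0 and n not in suite_set)
-- ===== Notes on version B (the rewrite author's own statement) =====
-- stated objective: faster
-- what changed: Keeps the raison detection (sorted consecutive differences + Counter.most_common) but drops the premier_terme back-walk loop and the forward term-generation loop: B returns the sorted numbers from 1 to 90 whose residue mod raison equals that of the smallest element and which are absent from the suite, a closed-form congruence sweep.
import Mathlib
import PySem

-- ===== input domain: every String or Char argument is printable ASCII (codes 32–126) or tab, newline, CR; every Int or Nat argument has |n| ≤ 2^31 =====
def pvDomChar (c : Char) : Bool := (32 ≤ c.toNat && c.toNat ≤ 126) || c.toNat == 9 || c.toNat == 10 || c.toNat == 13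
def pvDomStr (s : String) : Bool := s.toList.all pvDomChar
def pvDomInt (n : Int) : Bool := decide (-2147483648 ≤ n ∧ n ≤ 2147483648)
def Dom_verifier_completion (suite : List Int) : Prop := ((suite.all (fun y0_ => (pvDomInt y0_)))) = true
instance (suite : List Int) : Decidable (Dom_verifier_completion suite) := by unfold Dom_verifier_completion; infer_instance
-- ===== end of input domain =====

-- B keeps A's raison detection but replaces the back-walk + forward generation loops by a
-- closed-form congruence sweep over 1..90 (objective: simpler; return value proved equal).

-- ===== PORT A =====
-- shared raison phase: both Python sources contain these identical lines
-- (sorted consecutive differences, then Counter(...).most_common(1)[0][0])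
def pvDiffs (st : List Int) : List Int :=
  (PySem.List.pyRange 0 ((st.length : Int) - 1) 1).foldl
    (fun acc i =>
      if PySem.List.pyGetD st (i + 1) 0 - PySem.List.pyGetD st i 0 != 0 then
        acc ++ [PySem.List.pyGetD st (i + 1) 0 - PySem.List.pyGetD st i 0]
      else acc) []

-- Counter(raisons).most_common(1)[0][0] = first key of maximal count in insertion order;
-- the `none` branch is unreachable (only called with raisons ≠ []).
def pvRaison (raisons : List Int) : Int :=
  match PySem.List.max? (PySem.Dict.counter raisons).items (fun p => p.2) with
  | some p => p.1
  | none => 0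

-- `while premier_terme - raison > 0: premier_terme -= raison` (0 < r guard only for totality)
def pvBackwalk (pt r : Int) : Int :=
  if h : 0 < r ∧ 0 < pt - r then pvBackwalk (pt - r) r else pt
termination_by pt.toNat
decreasing_by omega

-- `while terme_courant <= 90: append; terme_courant += raison` (0 < r guard only for totality)
def pvGen (t r : Int) : List Int :=
  if h : 0 < r ∧ t ≤ 90 then t :: pvGen (t + r) r else []
termination_by (91 - t).toNat
decreasing_by omega

def verifier_completion (suite : List Int) : List Int :=
  if suite.length < 2 then [] else
  let suite_set : PySem.Set Int := PySem.Set.ofList suite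
  let suite_triee := PySem.List.sorted suite (fun x : Int => x) false
  let raisons_candidates := pvDiffs suite_triee
  if raisons_candidates = [] then [] else
  let raison := pvRaison raisons_candidates
  let premier_terme := pvBackwalk (PySem.List.pyGetD suite_triee 0 0) raison
  let termes_theoriques := pvGen premier_terme raison
  let nombres_manquants := termes_theoriques.filter
    (fun terme => !(PySem.Set.contains suite_set terme) && decide (0 < terme) && decide (terme ≤ 90))
  PySem.List.sorted nombres_manquants (fun x : Int => x) false

-- ===== PORT B =====
def verifier_completion_alt (suite : List Int) : List Int :=
  if suite.length < 2 then [] else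
  let suite_set : PySem.Set Int := PySem.Set.ofList suite
  let suite_triee := PySem.List.sorted suite (fun x : Int => x) false
  let raisons_candidates := pvDiffs suite_triee
  if raisons_candidates = [] then [] else
  let raison := pvRaison raisons_candidates
  let r0 := PySem.Int.mod (PySem.List.pyGetD suite_triee 0 0) raison
  PySem.List.sorted
    ((PySem.List.pyRange 1 91 1).filter
      (fun n => (PySem.Int.mod n raison == r0) && !(PySem.Set.contains suite_set n)))
    (fun x : Int => x) false

-- ===== PRECONDITION & SPEC =====
def Spec_verifier_completion (suite : List Int) (out : List Int) : Prop := out = verifier_completion_alt suite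
instance (suite : List Int) (out : List Int) : Decidable (Spec_verifier_completion suite out) := by unfold Spec_verifier_completion; infer_instance

-- ===== CLAIM (what is proved, stated in full; the proofs are below) =====
def Claim_equal_verifier_completion : Prop := ∀ (suite : List Int), Dom_verifier_completion suite → Spec_verifier_completion suite (verifier_completion suite)

-- ===== LEMMAS AND PROOFS =====

lemma pvDiffs_pos (st : List Int) (hst : st.Pairwise (· ≤ ·)) :
    ∀ x ∈ pvDiffs st, 0 < x := by
  intro x hx
  unfold pvDiffs at hx
  rw [PySem.List.foldl_append_if] at hx
  simp only [List.nil_append, List.mem_map, List.mem_filter, bne_iff_ne, ne_eq] at hx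
  obtain ⟨i, ⟨hmem, hne⟩, hx⟩ := hx
  rw [PySem.List.mem_pyRange_one] at hmem
  obtain ⟨h0, h1⟩ := hmem
  have hi1 : i + 1 < (st.length : Int) := by omega
  rw [PySem.List.pyGetD_eq_getElem st 0 (by omega) hi1,
      PySem.List.pyGetD_eq_getElem st 0 h0 (by omega)] at hx hne
  have hle : st[i.toNat] ≤ st[(i + 1).toNat] := by
    rw [List.pairwise_iff_getElem] at hst
    exact hst _ _ _ _ (by omega)
  omega

lemma pvRaison_mem (raisons : List Int) (h : raisons ≠ []) :
    pvRaison raisons ∈ raisons := by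
  unfold pvRaison
  rcases hm : PySem.List.max? (PySem.Dict.counter raisons).items (fun p => p.2) with _ | p
  · rw [PySem.List.max?_eq_none_iff] at hm
    rw [PySem.Dict.items_counter] at hm
    simp only [List.map_eq_nil_iff] at hm
    cases raisons with
    | nil => exact absurd rfl h
    | cons a t =>
      have ha : a ∈ PySem.Set.ofList (a :: t) := (PySem.Set.mem_ofList _ _).mpr (by simp)
      rw [hm] at ha
      exact absurd ha (List.not_mem_nil)
  · show p.1 ∈ raisons
    have := PySem.List.max?_mem hm
    rw [PySem.Dict.items_counter] at this
    simp only [List.mem_map] at this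
    obtain ⟨k, hk, hkp⟩ := this
    have : p.1 = k := by rw [← hkp]
    rw [this]
    exact (PySem.Set.mem_ofList raisons k).mp hk

lemma pvBackwalk_spec (m r : Int) (hr : 0 < r) :
    pvBackwalk m r ≤ r ∧ r ∣ (m - pvBackwalk m r) := by
  fun_induction pvBackwalk m r with
  | case1 pt h ih =>
    refine ⟨ih.1, ?_⟩
    obtain ⟨c, hc⟩ := ih.2
    exact ⟨c + 1, by linarith⟩
  | case2 pt h =>
    constructor
    · omega
    · exact ⟨0, by ring⟩

lemma pvGen_mem (r : Int) (hr : 0 < r) (s t : Int) :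
    t ∈ pvGen s r ↔ s ≤ t ∧ t ≤ 90 ∧ r ∣ (t - s) := by
  fun_induction pvGen s r with
  | case1 s h ih =>
    rw [List.mem_cons, ih]
    constructor
    · rintro (rfl | ⟨h1, h2, c, hc⟩)
      · exact ⟨le_refl _, h.2, ⟨0, by ring⟩⟩
      · exact ⟨by omega, h2, ⟨c + 1, by linarith⟩⟩
    · rintro ⟨h1, h2, c, hc⟩
      by_cases hts : t = s
      · exact Or.inl hts
      · have hc1 : 1 ≤ c := by
          by_contra hcl
          have hc0 : c ≤ 0 := by omega
          have hle : r * c ≤ r * 0 := mul_le_mul_of_nonneg_left hc0 (le_of_lt hr)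
          simp only [mul_zero] at hle
          omega
        have hrc : r * 1 ≤ r * c := mul_le_mul_of_nonneg_left hc1 (le_of_lt hr)
        refine Or.inr ⟨by linarith, h2, ⟨c - 1, by linear_combination hc⟩⟩
  | case2 s h =>
    simp only [List.not_mem_nil, false_iff]
    rintro ⟨h1, h2, c, hc⟩
    have : ¬ s ≤ 90 := by tauto
    omega

lemma pvGen_pairwise (r : Int) (hr : 0 < r) (s : Int) :
    (pvGen s r).Pairwise (· < ·) := by
  fun_induction pvGen s r with
  | case1 s h ih =>
    rw [List.pairwise_cons]
    refine ⟨?_, ih⟩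
    intro t ht
    have := (pvGen_mem r hr (s + r) t).mp ht
    omega
  | case2 s h => exact List.Pairwise.nil

lemma eq_of_pairwise_lt_of_mem_iff :
    ∀ (l1 l2 : List Int), l1.Pairwise (· < ·) → l2.Pairwise (· < ·) →
      (∀ x, x ∈ l1 ↔ x ∈ l2) → l1 = l2 := by
  intro l1
  induction l1 with
  | nil =>
    intro l2 _ _ hmem
    cases l2 with
    | nil => rfl
    | cons b t => exact absurd ((hmem b).mpr (List.mem_cons_self)) (List.not_mem_nil)
  | cons a t ih =>
    intro l2 h1 h2 hmem
    cases l2 with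
    | nil => exact absurd ((hmem a).mp (List.mem_cons_self)) (List.not_mem_nil)
    | cons b t2 =>
      have hab : a = b := by
        have ha : a ∈ b :: t2 := (hmem a).mp (List.mem_cons_self)
        have hb : b ∈ a :: t := (hmem b).mpr (List.mem_cons_self)
        rcases List.mem_cons.mp ha with h | h
        · exact h
        · rcases List.mem_cons.mp hb with h' | h'
          · exact h'.symm
          · have := (List.pairwise_cons.mp h2).1 a h
            have := (List.pairwise_cons.mp h1).1 b h'
            omega
      subst hab
      have : t = t2 := by
        apply ih t2 (List.pairwise_cons.mp h1).2 (List.pairwise_cons.mp h2).2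
        intro x
        constructor
        · intro hx
          have := (hmem x).mp (List.mem_cons_of_mem a hx)
          rcases List.mem_cons.mp this with h | h
          · exact absurd hx (by subst h; intro hc; exact absurd ((List.pairwise_cons.mp h1).1 x hc) (lt_irrefl x))
          · exact h
        · intro hx
          have := (hmem x).mpr (List.mem_cons_of_mem a hx)
          rcases List.mem_cons.mp this with h | h
          · exact absurd hx (by subst h; intro hc; exact absurd ((List.pairwise_cons.mp h2).1 x hc) (lt_irrefl x))
          · exact h
      rw [this]

lemma mod_eq_iff_dvd (r x m : Int) (hr : 0 < r) :
    PySem.Int.mod x r = PySem.Int.mod m r ↔ r ∣ (m - x) := by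
  rw [PySem.Int.mod_eq_emod_of_pos hr, PySem.Int.mod_eq_emod_of_pos hr]
  exact Int.modEq_iff_dvd

-- ===== VERDICT (by name: the statement is the Claim_ definition above) =====
theorem verifier_completion_spec : Claim_equal_verifier_completion := by
  intro suite _
  unfold Spec_verifier_completion verifier_completion verifier_completion_alt
  by_cases hlen : suite.length < 2
  · simp [hlen]
  rw [if_neg hlen, if_neg hlen]
  by_cases hnil : pvDiffs (PySem.List.sorted suite (fun x : Int => x) false) = []
  · simp only [hnil, if_pos]
  simp only [if_neg hnil]
  set st := PySem.List.sorted suite (fun x : Int => x) false with hstdef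
  set r := pvRaison (pvDiffs st) with hrdef
  set m := PySem.List.pyGetD st 0 0 with hmdef
  set pt := pvBackwalk m r with hptdef
  have hr : 0 < r := pvDiffs_pos st (PySem.List.sorted_pairwise suite _) r (pvRaison_mem _ hnil)
  obtain ⟨hpt_le, hpt_dvd⟩ := pvBackwalk_spec m r hr
  have hlist :
      (pvGen pt r).filter
        (fun terme => !(PySem.Set.contains (PySem.Set.ofList suite) terme) && decide (0 < terme) && decide (terme ≤ 90)) =
      (PySem.List.pyRange 1 91 1).filter
        (fun n => (PySem.Int.mod n r == PySem.Int.mod m r) && !(PySem.Set.contains (PySem.Set.ofList suite) n)) := by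
    apply eq_of_pairwise_lt_of_mem_iff
    · exact (pvGen_pairwise r hr pt).filter _
    · exact (PySem.List.pairwise_lt_pyRange_one 1 91).filter _
    · intro x
      simp only [List.mem_filter, pvGen_mem r hr, PySem.List.mem_pyRange_one,
        Bool.and_eq_true, Bool.not_eq_true', decide_eq_true_eq, beq_iff_eq,
        mod_eq_iff_dvd r x m hr]
      have hcont : PySem.Set.contains (PySem.Set.ofList suite) x = false ↔ ¬ x ∈ suite := by
        simp [PySem.Set.contains, PySem.Set.mem_ofList]
      rw [hcont]
      constructor
      · rintro ⟨⟨h1, h2, hdvd⟩, ⟨hns, h3⟩, h4⟩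
        refine ⟨⟨by omega, by omega⟩, ?_, hns⟩
        have : m - x = (m - pt) - (x - pt) := by ring
        rw [this]
        exact dvd_sub hpt_dvd hdvd
      · rintro ⟨⟨h1, h2⟩, hdvd, hns⟩
        have hxpt : r ∣ (x - pt) := by
          have : x - pt = (m - pt) - (m - x) := by ring
          rw [this]
          exact dvd_sub hpt_dvd hdvd
        have hple : pt ≤ x := by
          by_contra hlt
          have h0 : 0 < pt - x := by omega
          have hdp : r ∣ (pt - x) := by
            have e : pt - x = (m - x) - (m - pt) := by ring
            rw [e]
            exact dvd_sub hdvd hpt_dvd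
          have := Int.le_of_dvd h0 hdp
          omega
        exact ⟨⟨hple, by omega, hxpt⟩, ⟨hns, by omega⟩, by omega⟩
  rw [hlist]
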